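-- pv_equiv track=rewrite | github.com/intel/xFasterTransformer | examples/web_demo/web_demo_api.py | create_chat_input
-- ===== SOURCE A (Python) =====
-- def create_chat_input(chatbot):
--     msgs = []
--     for msg in chatbot:
--         if "metadata" not in msg or msg["metadata"] is None:
--             msgs.append({"role": msg["role"], "content": msg["content"]})
--     if len(msgs) > 8:
--         msgs = msgs[-8:]
--     return msgs
-- ===== SOURCE B (Python) =====
-- def create_chat_input(chatbot):
--     # Reverse pass with early termination at 8 kept messages, then reverse back.
--     out = []
--     for msg in reversed(chatbot):
--         if "metadata" not in msg or msg["metadata"] is None: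
--             out.append({"role": msg["role"], "content": msg["content"]})
--             if len(out) == 8:
--                 break
--     out.reverse()
--     return out
-- ===== Notes on version B (the rewrite author's own statement) =====
-- stated objective: alternative
-- what changed: Single reverse traversal that stops as soon as 8 qualifying messages are collected (then reverses back), instead of filtering the whole list forward and slicing off the last 8.
import Mathlib
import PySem

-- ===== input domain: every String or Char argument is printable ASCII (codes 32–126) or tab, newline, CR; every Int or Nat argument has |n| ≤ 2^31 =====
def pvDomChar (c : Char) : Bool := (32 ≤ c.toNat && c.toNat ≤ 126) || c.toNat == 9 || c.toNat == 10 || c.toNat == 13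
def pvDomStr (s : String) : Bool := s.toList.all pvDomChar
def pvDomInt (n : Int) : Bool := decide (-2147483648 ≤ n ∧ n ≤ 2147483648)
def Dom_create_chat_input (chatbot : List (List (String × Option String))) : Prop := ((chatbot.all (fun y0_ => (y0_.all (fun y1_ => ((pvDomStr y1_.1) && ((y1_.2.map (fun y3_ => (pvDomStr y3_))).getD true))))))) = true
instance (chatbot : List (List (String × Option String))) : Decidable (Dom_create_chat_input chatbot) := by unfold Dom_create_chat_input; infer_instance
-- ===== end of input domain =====

-- B changes the traversal: one reverse pass that stops after 8 kept messages, then a final reverse,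
-- instead of A's full forward filter followed by a [-8:] slice. Equivalence of the RETURN value.

-- ===== PORT A =====
-- '"metadata" not in msg or msg["metadata"] is None' (dict = assoc list, first-match lookup)
def pvKeep (msg : List (String × Option String)) : Bool :=
  match msg.lookup "metadata" with
  | some (some _) => false
  | _ => true

-- msg[k] for the output dict; exact whenever the key exists with a non-None value (guaranteed by Pre_;
-- Python raises KeyError / yields a non-str value otherwise, which Pre_ excludes)
def pvGetStr (msg : List (String × Option String)) (k : String) : String :=
  ((msg.lookup k).getD none).getD ""

-- {"role": msg["role"], "content": msg["content"]}
def pvMk (msg : List (String × Option String)) : List (String × String) :=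
  [("role", pvGetStr msg "role"), ("content", pvGetStr msg "content")]

def create_chat_input (chatbot : List (List (String × Option String))) : List (List (String × String)) :=
  let msgs := chatbot.foldl (fun acc msg => if pvKeep msg then acc ++ [pvMk msg] else acc) []
  if msgs.length > 8 then PySem.List.slice msgs (some (-8)) none else msgs

-- ===== PORT B =====
def altGo : List (List (String × Option String)) → List (List (String × String)) → List (List (String × String))
  | [], out => out
  | msg :: rest, out =>
    if pvKeep msg then
      let out' := out ++ [pvMk msg]
      if out'.length = 8 then out' else altGo rest out'
    else altGo rest out

def create_chat_input_alt (chatbot : List (List (String × Option String))) : List (List (String × String)) :=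
  (altGo chatbot.reverse []).reverse

-- ===== PRECONDITION & SPEC =====
-- Pre_ excludes inputs where a kept message lacks a "role"/"content" key (A raises KeyError) or maps
-- it to None (A returns a dict whose value is not a str, i.e. not a value of the declared output type).
def Pre_create_chat_input (chatbot : List (List (String × Option String))) : Prop :=
  ∀ msg ∈ chatbot, pvKeep msg = true →
    ((msg.lookup "role").getD none).isSome = true ∧ ((msg.lookup "content").getD none).isSome = true
instance (chatbot : List (List (String × Option String))) : Decidable (Pre_create_chat_input chatbot) := by
  unfold Pre_create_chat_input; infer_instance

def pvWitness_create_chat_input : (List (List (String × Option String))) :=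
  [[("role", some "user"), ("content", some "hi")], [("role", some "assistant"), ("content", some "yo"), ("metadata", some "m")]]

def Spec_create_chat_input (chatbot : List (List (String × Option String))) (out : List (List (String × String))) : Prop := out = create_chat_input_alt chatbot
instance (chatbot : List (List (String × Option String))) (out : List (List (String × String))) : Decidable (Spec_create_chat_input chatbot out) := by unfold Spec_create_chat_input; infer_instance

-- ===== CLAIM (what is proved, stated in full; the proofs are below) =====
def Claim_equal_create_chat_input : Prop := ∀ (chatbot : List (List (String × Option String))), Dom_create_chat_input chatbot → Pre_create_chat_input chatbot → Spec_create_chat_input chatbot (create_chat_input chatbot)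

-- ===== LEMMAS AND PROOFS =====

-- the forward-filtered message list
def pvKept (l : List (List (String × Option String))) : List (List (String × String)) :=
  (l.filter pvKeep).map pvMk

theorem altGo_eq (l : List (List (String × Option String)))
    (out : List (List (String × String))) (h : out.length < 8) :
    altGo l out = out ++ (pvKept l).take (8 - out.length) := by
  induction l generalizing out with
  | nil => simp [altGo, pvKept]
  | cons msg rest ih =>
    by_cases hk : pvKeep msg
    · simp only [altGo, hk, if_pos]
      by_cases h8 : (out ++ [pvMk msg]).length = 8
      · simp only [if_pos h8]
        simp only [List.length_append, List.length_cons, List.length_nil] at h8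
        have : 8 - out.length = 1 := by omega
        simp [pvKept, hk, this]
      · simp only [if_neg h8]
        simp only [List.length_append, List.length_cons, List.length_nil] at h8
        rw [ih _ (by simp; omega)]
        have : 8 - (out ++ [pvMk msg]).length = (8 - out.length) - 1 := by
          simp; omega
        rw [this]
        have h1 : pvKept (msg :: rest) = pvMk msg :: pvKept rest := by
          simp [pvKept, hk]
        rw [h1]
        have h2 : 1 ≤ 8 - out.length := by omega
        cases hn : 8 - out.length with
        | zero => omega
        | succ n => simp [List.take_succ_cons]
    · simp only [altGo, hk, Bool.false_eq_true, if_false]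
      rw [ih _ h, show pvKept (msg :: rest) = pvKept rest by simp [pvKept, hk]]

theorem kept_reverse (l : List (List (String × Option String))) :
    pvKept l.reverse = (pvKept l).reverse := by
  simp [pvKept, List.filter_reverse, List.map_reverse]

theorem create_chat_input_spec : Claim_equal_create_chat_input := by
  intro chatbot _ _
  unfold Spec_create_chat_input create_chat_input create_chat_input_alt
  rw [altGo_eq _ _ (by simp)]
  simp only [List.nil_append, List.length_nil, Nat.sub_zero, kept_reverse]
  rw [PySem.List.foldl_append_if pvKeep pvMk]
  simp only [List.nil_append]
  show (if (pvKept chatbot).length > 8 then PySem.List.slice (pvKept chatbot) (some (-8)) none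
        else pvKept chatbot) = ((pvKept chatbot).reverse.take 8).reverse
  set m := pvKept chatbot with hm
  by_cases h : m.length > 8
  · rw [if_pos h, PySem.List.slice_from_neg_ofNat m 8 (by omega)]
    rw [List.take_reverse, List.reverse_reverse]
  · rw [if_neg h]
    rw [List.take_of_length_le (by simp; omega), List.reverse_reverse]
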